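-- pv_equiv track=rewrite | github.com/knitty-kim/ProgrammersSolvingCode | 프로그래머스/0/120878. 유한소수 판별하기/유한소수 판별하기.py | solution
-- ===== SOURCE A (Python) =====
-- import math
--
-- def solution(a, b):
--     # 최대공약수 c
--     c = math.gcd(a, b)
--     while a % c == 0 and b % c == 0 and c != 1:
--         a //= c
--         b //= c
--
--     while True:
--         if b % 2 == 0:
--             b //= 2
--         elif b % 5 == 0:
--             b //= 5
--         else:
--             break
--
--     if b != 1:
--         return 2
--     else:
--         return 1
-- ===== SOURCE B (Python) =====
-- import math
--
-- def solution(a, b):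
--     # a/b is a finite decimal iff the reduced denominator d = b // gcd(a, b) is a
--     # positive divisor of a large power of ten (within the 32-bit input domain,
--     # 10**64 suffices): a single modular-exponentiation test, no stripping loop.
--     d = b // math.gcd(a, b)
--     return 1 if d > 0 and pow(10, 64, d) == 0 else 2
-- ===== Notes on version B (the rewrite author's own statement) =====
-- stated objective: alternative
-- what changed: Replaces A's two while-loops (gcd reduction over (a,b) and repeated stripping of factors 2 and 5) by a loop-free test: reduce once to d = b // gcd(a,b) and check d > 0 and pow(10, 64, d) == 0, i.e. d is a positive divisor of a power of ten.
import Mathlib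
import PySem

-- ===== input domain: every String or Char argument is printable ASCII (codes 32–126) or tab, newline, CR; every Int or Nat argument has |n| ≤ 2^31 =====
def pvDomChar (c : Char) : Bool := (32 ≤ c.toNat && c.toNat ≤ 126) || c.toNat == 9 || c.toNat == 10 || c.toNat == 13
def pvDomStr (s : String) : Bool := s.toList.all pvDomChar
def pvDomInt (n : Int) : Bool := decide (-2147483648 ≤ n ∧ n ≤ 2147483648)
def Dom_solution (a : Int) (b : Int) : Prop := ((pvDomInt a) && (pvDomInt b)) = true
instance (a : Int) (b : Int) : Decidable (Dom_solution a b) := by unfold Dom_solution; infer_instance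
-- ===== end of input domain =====

-- B replaces A's two while-loops by a loop-free test: d = b // gcd(a,b) is a positive
-- divisor of 10^64; same return value on every input where A returns.

-- termination helpers cited by the ports' decreasing_by
lemma pv_natAbs_ediv_le (d g : Int) (hg : 2 ≤ g) (hdvd : g ∣ d) :
    (d / g).natAbs ≤ d.natAbs := by
  obtain ⟨k, rfl⟩ := hdvd
  rw [Int.mul_ediv_cancel_left _ (by omega : g ≠ 0)]
  calc k.natAbs ≤ g.natAbs * k.natAbs := Nat.le_mul_of_pos_left _ (by omega)
    _ = (g * k).natAbs := (Int.natAbs_mul g k).symm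

lemma pv_natAbs_ediv_lt (d g : Int) (hd : d ≠ 0) (hg : 2 ≤ g) (hdvd : g ∣ d) :
    (d / g).natAbs < d.natAbs := by
  obtain ⟨k, rfl⟩ := hdvd
  rw [Int.mul_ediv_cancel_left _ (by omega : g ≠ 0)]
  have hk : k ≠ 0 := by rintro rfl; simp at hd
  have hm : (g * k).natAbs = g.natAbs * k.natAbs := Int.natAbs_mul g k
  calc k.natAbs < 2 * k.natAbs := by omega
    _ ≤ g.natAbs * k.natAbs := Nat.mul_le_mul_right _ (by omega)
    _ = (g * k).natAbs := hm.symm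

-- decreasing lemmas cited by the ports' decreasing_by (kept as single applications)
lemma pv_loop1_dec (c a b : Int) (h1 : PySem.Int.mod a c = 0) (h2 : PySem.Int.mod b c = 0)
    (hne : c ≠ 1) (hpos : 0 < c) (hz : ¬(a = 0 ∧ b = 0)) :
    (PySem.Int.floordiv a c).natAbs + (PySem.Int.floordiv b c).natAbs < a.natAbs + b.natAbs := by
  have hda : c ∣ a := (PySem.Int.mod_eq_zero_iff_dvd a c).mp h1
  have hdb : c ∣ b := (PySem.Int.mod_eq_zero_iff_dvd b c).mp h2
  have hc2 : 2 ≤ c := by omega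
  rw [PySem.Int.floordiv_eq_ediv_of_pos hpos, PySem.Int.floordiv_eq_ediv_of_pos hpos]
  rcases eq_or_ne a 0 with ha | ha
  · have hb : b ≠ 0 := by tauto
    have l1 := pv_natAbs_ediv_lt b c hb hc2 hdb
    have l2 := pv_natAbs_ediv_le a c hc2 hda
    omega
  · have l1 := pv_natAbs_ediv_lt a c ha hc2 hda
    have l2 := pv_natAbs_ediv_le b c hc2 hdb
    omega

lemma pv_loop2_dec2 (b : Int) (hz : b ≠ 0) (h2 : PySem.Int.mod b 2 = 0) :
    (PySem.Int.floordiv b 2).natAbs < b.natAbs := by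
  rw [PySem.Int.floordiv_eq_ediv_of_pos (by norm_num)]
  exact pv_natAbs_ediv_lt b 2 hz (by norm_num) ((PySem.Int.mod_eq_zero_iff_dvd b 2).mp h2)

lemma pv_loop2_dec5 (b : Int) (hz : b ≠ 0) (h5 : PySem.Int.mod b 5 = 0) :
    (PySem.Int.floordiv b 5).natAbs < b.natAbs := by
  rw [PySem.Int.floordiv_eq_ediv_of_pos (by norm_num)]
  exact pv_natAbs_ediv_lt b 5 hz (by norm_num) ((PySem.Int.mod_eq_zero_iff_dvd b 5).mp h5)

-- ===== PORT A =====
-- first while loop: 'while a % c == 0 and b % c == 0 and c != 1'.  The extra guards 0 < c and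
-- ¬(a = 0 ∧ b = 0) only make the recursion total: when c = 0 Python raises ZeroDivisionError at
-- 'a % c' (outside Pre_solution), and a = b = 0 with 0 < c never occurs on a reachable call.
def solutionLoop1 (c : Int) (a : Int) (b : Int) : Int × Int :=
  if h : PySem.Int.mod a c = 0 ∧ PySem.Int.mod b c = 0 ∧ c ≠ 1 ∧ 0 < c ∧ ¬(a = 0 ∧ b = 0) then
    solutionLoop1 c (PySem.Int.floordiv a c) (PySem.Int.floordiv b c)
  else (a, b)
termination_by a.natAbs + b.natAbs
decreasing_by exact pv_loop1_dec c a b h.1 h.2.1 h.2.2.1 h.2.2.2.1 h.2.2.2.2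

-- second while loop: strip factors 2, then 5.  Guard b ≠ 0: on b = 0 Python's loop never
-- terminates ('0 % 2 == 0' forever) — outside Pre_solution.
def solutionLoop2 (b : Int) : Int :=
  if hz : b = 0 then b
  else if h2 : PySem.Int.mod b 2 = 0 then solutionLoop2 (PySem.Int.floordiv b 2)
  else if h5 : PySem.Int.mod b 5 = 0 then solutionLoop2 (PySem.Int.floordiv b 5)
  else b
termination_by b.natAbs
decreasing_by
  · exact pv_loop2_dec2 b hz h2
  · exact pv_loop2_dec5 b hz h5

def solution (a : Int) (b : Int) : Int :=
  -- c = math.gcd(a, b): the nonnegative gcd; then the two loops, then the final branch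
  if solutionLoop2 (solutionLoop1 ((Int.gcd a b : Nat) : Int) a b).2 ≠ 1 then 2 else 1

-- ===== PORT B =====
-- 'd = b // math.gcd(a, b); return 1 if d > 0 and pow(10, 64, d) == 0 else 2'
-- (pow(10, 64, d) is the builtin modular power: its value is 10^64 % d, ported as such)
def solution_alt (a : Int) (b : Int) : Int :=
  let d : Int := PySem.Int.floordiv b ((Int.gcd a b : Nat) : Int)
  if 0 < d ∧ PySem.Int.mod ((10:Int) ^ 64) d = 0 then 1 else 2

-- ===== PRECONDITION & SPEC =====
-- Pre_ excludes exactly the inputs where A does not return: b = 0 (Python A raises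
-- ZeroDivisionError when a = b = 0 and loops forever when b = 0 ≠ a; B raises there too).
def Pre_solution (a : Int) (b : Int) : Prop := b ≠ 0
instance (a : Int) (b : Int) : Decidable (Pre_solution a b) := by unfold Pre_solution; infer_instance
def pvWitness_solution : Int × Int := (6, 20)

def Spec_solution (a : Int) (b : Int) (out : Int) : Prop := out = solution_alt a b
instance (a : Int) (b : Int) (out : Int) : Decidable (Spec_solution a b out) := by unfold Spec_solution; infer_instance

-- ===== CLAIM (what is proved, stated in full; the proofs are below) =====
def Claim_equal_solution : Prop := ∀ (a : Int) (b : Int), Dom_solution a b → Pre_solution a b → Spec_solution a b (solution a b)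

-- ===== LEMMAS AND PROOFS =====

lemma pv_ediv_ne_zero (d g : Int) (hd : d ≠ 0) (hg : g ≠ 0) (hdvd : g ∣ d) : d / g ≠ 0 := by
  obtain ⟨k, rfl⟩ := hdvd
  rw [Int.mul_ediv_cancel_left _ hg]
  rintro rfl; simp at hd

-- A's first loop computes b // gcd(a, b) in its second component (it runs at most once)
lemma pv_loop1_snd (a b : Int) (hb : b ≠ 0) :
    (solutionLoop1 ((Int.gcd a b : Nat) : Int) a b).2 = b / ((Int.gcd a b : Nat) : Int) := by
  have hpos : 0 < ((Int.gcd a b : Nat) : Int) := by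
    have : Int.gcd a b ≠ 0 := fun h => hb (Int.gcd_eq_zero_iff.mp h).2
    omega
  rcases eq_or_ne (Int.gcd a b) 1 with h1 | h1
  · rw [solutionLoop1, dif_neg (by simp [h1])]
    simp [h1]
  · have hc2 : (2:Int) ≤ ((Int.gcd a b : Nat) : Int) := by omega
    have hda : ((Int.gcd a b : Nat) : Int) ∣ a := Int.gcd_dvd_left a b
    have hdb : ((Int.gcd a b : Nat) : Int) ∣ b := Int.gcd_dvd_right a b
    rw [solutionLoop1, dif_pos ⟨(PySem.Int.mod_eq_zero_iff_dvd a _).mpr hda,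
        (PySem.Int.mod_eq_zero_iff_dvd b _).mpr hdb, by omega, hpos, fun h => hb h.2⟩]
    rw [PySem.Int.floordiv_eq_ediv_of_pos hpos, PySem.Int.floordiv_eq_ediv_of_pos hpos]
    rw [solutionLoop1, dif_neg]
    rintro ⟨ha', hb', hne, -, -⟩
    have hga : ((Int.gcd a b : Nat) : Int) ∣ a / ((Int.gcd a b : Nat) : Int) :=
      (PySem.Int.mod_eq_zero_iff_dvd _ _).mp ha'
    have hgb : ((Int.gcd a b : Nat) : Int) ∣ b / ((Int.gcd a b : Nat) : Int) :=
      (PySem.Int.mod_eq_zero_iff_dvd _ _).mp hb'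
    have hone : Int.gcd (a / ((Int.gcd a b : Nat) : Int)) (b / ((Int.gcd a b : Nat) : Int)) = 1 :=
      Int.gcd_div_gcd_div_gcd (by omega)
    have : ((Int.gcd a b : Nat) : Int) ∣ ((1:Nat) : Int) := by
      rw [← hone]
      exact_mod_cast Int.dvd_gcd (a := a / _) (b := b / _) (c := Int.gcd a b)
        (by exact_mod_cast hga) (by exact_mod_cast hgb)
    have := Int.le_of_dvd (by norm_num) this
    omega

-- if d is coprime to 2 and 5 and divides a power of ten, d = ±1
lemma pv_coprime_ten (d : Int) (h2 : ¬(2:Int) ∣ d) (h5 : ¬(5:Int) ∣ d)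
    {n : Nat} (hdvd : d ∣ (10:Int) ^ n) : d.natAbs = 1 := by
  have h2n : ¬(2:Nat) ∣ d.natAbs := fun hc => h2 (Int.natAbs_dvd_natAbs.mp (by simpa using hc))
  have h5n : ¬(5:Nat) ∣ d.natAbs := fun hc => h5 (Int.natAbs_dvd_natAbs.mp (by simpa using hc))
  have hc2 : Nat.Coprime d.natAbs 2 := ((Nat.prime_two.coprime_iff_not_dvd).mpr h2n).symm
  have hc5 : Nat.Coprime d.natAbs 5 := ((Nat.prime_five.coprime_iff_not_dvd).mpr h5n).symm
  have hc10 : Nat.Coprime d.natAbs 10 := by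
    have := Nat.Coprime.mul_right hc2 hc5
    simpa using this
  have hdn : d.natAbs ∣ 10 ^ n := by
    have := Int.natAbs_dvd_natAbs.mpr hdvd
    simpa [Int.natAbs_pow] using this
  exact (hc10.pow_right n).eq_one_of_dvd hdn

-- forward: if A's stripping loop ends in 1, then d is a positive divisor of 10^n for 2^n ≥ |d|
lemma pv_loop2_dvd (n : Nat) : ∀ d : Int, d.natAbs ≤ 2 ^ n → d ≠ 0 →
    solutionLoop2 d = 1 → 0 < d ∧ d ∣ (10:Int) ^ n := by
  induction n with
  | zero =>
    intro d hle hd hloop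
    simp only [pow_zero] at hle
    have hd1 : d = 1 ∨ d = -1 := by omega
    rcases hd1 with rfl | rfl
    · exact ⟨by norm_num, by simp⟩
    · rw [solutionLoop2, dif_neg (by norm_num), dif_neg (by decide), dif_neg (by decide)] at hloop
      norm_num at hloop
  | succ n ih =>
    intro d hle hd hloop
    by_cases h2 : (2:Int) ∣ d
    · obtain ⟨k, rfl⟩ := h2
      have hk : k ≠ 0 := by rintro rfl; simp at hd
      have estep : solutionLoop2 (2 * k) = solutionLoop2 k := by
        rw [solutionLoop2, dif_neg hd, dif_pos ((PySem.Int.mod_eq_zero_iff_dvd _ _).mpr ⟨k, rfl⟩),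
          PySem.Int.floordiv_eq_ediv_of_pos (by norm_num), Int.mul_ediv_cancel_left _ (by norm_num)]
      rw [estep] at hloop
      have hkle : k.natAbs ≤ 2 ^ n := by
        have hm := Int.natAbs_mul (2:Int) k
        have hp : 0 < 2 ^ n := Nat.two_pow_pos n
        simp only [pow_succ] at hle
        omega
      obtain ⟨hkpos, hkdvd⟩ := ih k hkle hk hloop
      refine ⟨by omega, ?_⟩
      have hdd : (2:Int) * k ∣ 2 * (5 * (10:Int) ^ n) :=
        mul_dvd_mul_left 2 (hkdvd.trans (dvd_mul_left _ _))
      calc (2:Int) * k ∣ 2 * (5 * (10:Int) ^ n) := hdd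
        _ = (10:Int) ^ (n + 1) := by rw [pow_succ]; ring
    · by_cases h5 : (5:Int) ∣ d
      · obtain ⟨k, rfl⟩ := h5
        have hk : k ≠ 0 := by rintro rfl; simp at hd
        have estep : solutionLoop2 (5 * k) = solutionLoop2 k := by
          rw [solutionLoop2, dif_neg hd,
            dif_neg (fun hc => h2 ((PySem.Int.mod_eq_zero_iff_dvd _ _).mp hc)),
            dif_pos ((PySem.Int.mod_eq_zero_iff_dvd _ _).mpr ⟨k, rfl⟩),
            PySem.Int.floordiv_eq_ediv_of_pos (by norm_num), Int.mul_ediv_cancel_left _ (by norm_num)]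
        rw [estep] at hloop
        have hkle : k.natAbs ≤ 2 ^ n := by
          have hm := Int.natAbs_mul (5:Int) k
          have hp : 0 < 2 ^ n := Nat.two_pow_pos n
          simp only [pow_succ] at hle
          omega
        obtain ⟨hkpos, hkdvd⟩ := ih k hkle hk hloop
        refine ⟨by omega, ?_⟩
        have hdd : (5:Int) * k ∣ 5 * (2 * (10:Int) ^ n) :=
          mul_dvd_mul_left 5 (hkdvd.trans (dvd_mul_left _ _))
        calc (5:Int) * k ∣ 5 * (2 * (10:Int) ^ n) := hdd
          _ = (10:Int) ^ (n + 1) := by rw [pow_succ]; ring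
      · rw [solutionLoop2, dif_neg hd,
          dif_neg (fun hc => h2 ((PySem.Int.mod_eq_zero_iff_dvd _ _).mp hc)),
          dif_neg (fun hc => h5 ((PySem.Int.mod_eq_zero_iff_dvd _ _).mp hc))] at hloop
        subst hloop
        exact ⟨by norm_num, one_dvd _⟩

-- backward: a positive divisor of 10^64 strips down to 1
lemma pv_dvd_loop2 (n : Nat) : ∀ d : Int, d.natAbs ≤ n → 0 < d → d ∣ (10:Int) ^ 64 →
    solutionLoop2 d = 1 := by
  induction n with
  | zero => intro d hle hpos _; omega
  | succ n ih =>
    intro d hle hpos hdvd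
    by_cases h2 : (2:Int) ∣ d
    · obtain ⟨k, rfl⟩ := h2
      have hkpos : 0 < k := by omega
      have estep : solutionLoop2 (2 * k) = solutionLoop2 k := by
        rw [solutionLoop2, dif_neg (by omega : ¬(2:Int) * k = 0),
          dif_pos ((PySem.Int.mod_eq_zero_iff_dvd _ _).mpr ⟨k, rfl⟩),
          PySem.Int.floordiv_eq_ediv_of_pos (by norm_num), Int.mul_ediv_cancel_left _ (by norm_num)]
      rw [estep]
      have hm := Int.natAbs_mul (2:Int) k
      exact ih k (by omega) hkpos ((dvd_mul_left k 2).trans hdvd)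
    · by_cases h5 : (5:Int) ∣ d
      · obtain ⟨k, rfl⟩ := h5
        have hkpos : 0 < k := by omega
        have estep : solutionLoop2 (5 * k) = solutionLoop2 k := by
          rw [solutionLoop2, dif_neg (by omega : ¬(5:Int) * k = 0),
            dif_neg (fun hc => h2 ((PySem.Int.mod_eq_zero_iff_dvd _ _).mp hc)),
            dif_pos ((PySem.Int.mod_eq_zero_iff_dvd _ _).mpr ⟨k, rfl⟩),
            PySem.Int.floordiv_eq_ediv_of_pos (by norm_num), Int.mul_ediv_cancel_left _ (by norm_num)]
        rw [estep]
        have hm := Int.natAbs_mul (5:Int) k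
        exact ih k (by omega) hkpos ((dvd_mul_left k 5).trans hdvd)
      · have h1 : d.natAbs = 1 := pv_coprime_ten d h2 h5 hdvd
        have hd1 : d = 1 := by omega
        subst hd1
        rw [solutionLoop2, dif_neg (by norm_num), dif_neg (by decide), dif_neg (by decide)]

-- ===== VERDICT (by name: the statement is the Claim_ definition above) =====
theorem solution_spec : Claim_equal_solution := by
  intro a b hdom hb
  unfold Spec_solution solution solution_alt
  have hpos : 0 < ((Int.gcd a b : Nat) : Int) := by
    have : Int.gcd a b ≠ 0 := fun h => hb (Int.gcd_eq_zero_iff.mp h).2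
    omega
  have hdb : ((Int.gcd a b : Nat) : Int) ∣ b := Int.gcd_dvd_right a b
  rw [pv_loop1_snd a b hb, PySem.Int.floordiv_eq_ediv_of_pos hpos]
  set d := b / ((Int.gcd a b : Nat) : Int) with hd_def
  have hd : d ≠ 0 := pv_ediv_ne_zero b _ hb (by omega) hdb
  have hdle : d.natAbs ≤ 2 ^ 64 := by
    have h1 : d.natAbs ≤ b.natAbs := by
      have hmul : d * ((Int.gcd a b : Nat) : Int) = b := Int.ediv_mul_cancel hdb
      have hm : b.natAbs = d.natAbs * ((Int.gcd a b : Nat) : Int).natAbs := by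
        conv_lhs => rw [← hmul]
        rw [Int.natAbs_mul]
      have hg1 : 0 < ((Int.gcd a b : Nat) : Int).natAbs := by
        rw [Int.natAbs_natCast]; omega
      rw [hm]; exact Nat.le_mul_of_pos_right _ hg1
    have hbabs : b.natAbs ≤ 2147483648 := by
      unfold Dom_solution pvDomInt at hdom
      simp only [Bool.and_eq_true, decide_eq_true_eq] at hdom
      omega
    calc d.natAbs ≤ 2147483648 := le_trans h1 hbabs
      _ ≤ 2 ^ 64 := by norm_num
  show (if solutionLoop2 d ≠ 1 then (2:Int) else 1) =
      (if 0 < d ∧ PySem.Int.mod ((10:Int) ^ 64) d = 0 then (1:Int) else 2)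
  by_cases hloop : solutionLoop2 d = 1
  · obtain ⟨hdpos, hdvd⟩ := pv_loop2_dvd 64 d hdle hd hloop
    have hmod : PySem.Int.mod ((10:Int) ^ 64) d = 0 := (PySem.Int.mod_eq_zero_iff_dvd _ _).mpr hdvd
    rw [if_neg (by simp [hloop]), if_pos ⟨hdpos, hmod⟩]
  · have hcond : ¬(0 < d ∧ PySem.Int.mod ((10:Int) ^ 64) d = 0) := by
      rintro ⟨hdpos, hmod⟩
      exact hloop (pv_dvd_loop2 d.natAbs d le_rfl hdpos ((PySem.Int.mod_eq_zero_iff_dvd _ _).mp hmod))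
    rw [if_pos hloop, if_neg hcond]
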